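-- pv_equiv track=rewrite | github.com/Fondamenti18/fondamenti-di-programmazione | students/1801168/homework01/program01.py | divisori
-- ===== SOURCE A (Python) =====
-- def divisori(n,k):
--     count = 0
--     for i in range(2,n):
--         if n%i==0:
--             count+=1
--     if count==k:
--         return True
--     return False
-- ===== SOURCE B (Python) =====
-- def divisori(n, k):
--     # Count proper divisors (strictly between 1 and n) by trial division up to sqrt(n),
--     # adding each divisor pair at once.
--     if n < 2:
--         return k == 0
--     count = 0
--     i = 1
--     while i * i <= n:
--         if n % i == 0:
--             count += 1 if i * i == n else 2
--         i += 1
--     return count - 2 == k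
-- ===== Notes on version B (the rewrite author's own statement) =====
-- stated objective: faster
-- what changed: Replaces the O(n) scan over all candidates 2..n-1 with trial division up to sqrt(n) counting divisor pairs and subtracting the two trivial divisors 1 and n.
import Mathlib
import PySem

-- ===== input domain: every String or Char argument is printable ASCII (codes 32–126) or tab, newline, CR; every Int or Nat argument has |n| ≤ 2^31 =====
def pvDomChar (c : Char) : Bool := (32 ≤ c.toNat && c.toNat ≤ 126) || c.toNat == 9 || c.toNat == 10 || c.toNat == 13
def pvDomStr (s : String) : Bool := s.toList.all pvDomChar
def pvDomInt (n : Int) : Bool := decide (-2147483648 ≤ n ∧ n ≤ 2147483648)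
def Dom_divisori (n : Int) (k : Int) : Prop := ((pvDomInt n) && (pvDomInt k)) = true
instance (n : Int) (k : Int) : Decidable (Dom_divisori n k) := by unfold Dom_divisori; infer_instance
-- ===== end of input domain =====

-- B replaces A's scan of all candidates 2..n-1 by trial division up to sqrt(n) counting divisor pairs (objective: faster, asymptotic).

-- ===== PORT A =====
def divisori (n : Int) (k : Int) : Bool :=
  let count : Int := (PySem.List.pyRange 2 n 1).foldl
    (fun count i => if PySem.Int.mod n i == 0 then count + 1 else count) 0
  if count == k then true else false

-- ===== PORT B =====
-- fuel-guarded transcription of Source B's `while i * i <= n` loop (fuel n.toNat + 1 suffices: i stops past sqrt n)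
def divisoriLoopB (n : Int) : Nat → Int → Int → Int
  | 0, _, count => count
  | fuel + 1, i, count =>
    if i * i ≤ n then
      divisoriLoopB n fuel (i + 1)
        (if PySem.Int.mod n i == 0 then (if i * i == n then count + 1 else count + 2) else count)
    else count

def divisori_alt (n : Int) (k : Int) : Bool :=
  if n < 2 then k == 0
  else divisoriLoopB n (n.toNat + 1) 1 0 - 2 == k

-- ===== PRECONDITION & SPEC =====
def Spec_divisori (n : Int) (k : Int) (out : Bool) : Prop := out = divisori_alt n k
instance (n : Int) (k : Int) (out : Bool) : Decidable (Spec_divisori n k out) := by unfold Spec_divisori; infer_instance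

-- ===== CLAIM (what is proved, stated in full; the proofs are below) =====
def Claim_equal_divisori : Prop := ∀ (n : Int) (k : Int), Dom_divisori n k → Spec_divisori n k (divisori n k)

-- ===== LEMMAS AND PROOFS =====

-- 'if b then true else false' is b
lemma pvIfTF (b : Bool) : (if b = true then true else false) = b := by cases b <;> simp

-- per-candidate weight of B's pair-counting loop, in ℕ
def pvContrib (N j : ℕ) : ℕ := if j ∣ N then (if j * j = N then 1 else 2) else 0

-- A's foldl accumulates a count
lemma pvFoldlCount (l : List Int) (p : Int → Bool) (c : Int) :
    l.foldl (fun acc i => if p i then acc + 1 else acc) c = c + l.countP p := by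
  induction l generalizing c with
  | nil => simp
  | cons x xs ih =>
    by_cases h : p x
    · simp only [List.foldl_cons, List.countP_cons, h, if_pos, ih]; push_cast; ring
    · simp [h, ih]

lemma pvCountRange (m : ℕ) (p : ℕ → Prop) [DecidablePred p] :
    (List.range m).countP (fun j => decide (p j)) = ((Finset.range m).filter p).card := by
  induction m with
  | zero => simp
  | succ m ih => rw [List.range_succ, Finset.range_add_one, List.countP_append, Finset.filter_insert]
                 by_cases h : p m <;> simp [h, ih, Finset.card_insert_of_notMem]

-- A's count over range(2,n) is the number of divisors of N in [2, N)
lemma pvACount (N : ℕ) :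
    ((PySem.List.pyRange 2 (N : Int) 1).countP fun i => PySem.Int.mod (N : Int) i == 0)
      = ((Finset.Ico 2 N).filter (· ∣ N)).card := by
  rw [PySem.List.pyRange_one, List.countP_map]
  have h1 : ((N : Int) - 2).toNat = N - 2 := by omega
  rw [h1]
  have h2 : ((List.range (N - 2)).countP ((fun i => PySem.Int.mod (N : Int) i == 0) ∘ (fun k : ℕ => 2 + (k : Int))))
      = (List.range (N - 2)).countP (fun k => decide ((2 + k) ∣ N)) := by
    apply List.countP_congr
    intro k _
    simp only [Function.comp_apply, PySem.Int.mod_eq_zero_iff_dvd, beq_iff_eq, decide_eq_true_iff]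
    rw [show (2 : Int) + (k : Int) = ((2 + k : ℕ) : Int) by push_cast; ring]
    constructor <;> intro h <;> exact_mod_cast h
  rw [h2, pvCountRange]
  apply Finset.card_bij' (i := fun k _ => 2 + k) (j := fun d _ => d - 2)
  case hi => intro k hk
             simp only [Finset.mem_filter, Finset.mem_range, Finset.mem_Ico] at hk ⊢
             exact ⟨⟨by omega, by omega⟩, hk.2⟩
  case hj => intro d hd
             simp only [Finset.mem_filter, Finset.mem_range, Finset.mem_Ico] at hd ⊢
             exact ⟨by omega, by rw [show 2 + (d - 2) = d by omega]; exact hd.2⟩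
  case left_inv => intro k hk
                   simp only [Finset.mem_filter, Finset.mem_range] at hk
                   omega
  case right_inv => intro d hd
                    simp only [Finset.mem_filter, Finset.mem_Ico] at hd
                    omega

-- the middle divisors together with 1 and N are all divisors (N ≥ 2)
lemma pvDivSplit (N : ℕ) (h2 : 2 ≤ N) :
    N.divisors.card = ((Finset.Ico 2 N).filter (· ∣ N)).card + 2 := by
  have hset : N.divisors = insert 1 (insert N ((Finset.Ico 2 N).filter (· ∣ N))) := by
    ext d
    simp only [Nat.mem_divisors, Finset.mem_insert, Finset.mem_filter, Finset.mem_Ico]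
    constructor
    · rintro ⟨hd, -⟩
      have h1 : 1 ≤ d := Nat.pos_of_dvd_of_pos hd (by omega)
      have hle : d ≤ N := Nat.le_of_dvd (by omega) hd
      by_cases e1 : d = 1
      · exact Or.inl e1
      by_cases e2 : d = N
      · exact Or.inr (Or.inl e2)
      exact Or.inr (Or.inr ⟨⟨by omega, by omega⟩, hd⟩)
    · rintro (rfl | rfl | ⟨-, hd⟩)
      · exact ⟨one_dvd _, by omega⟩
      · exact ⟨dvd_rfl, by omega⟩
      · exact ⟨hd, by omega⟩
  rw [hset, Finset.card_insert_of_notMem, Finset.card_insert_of_notMem]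
  · simp [Finset.mem_filter, Finset.mem_Ico]
  · simp only [Finset.mem_insert, Finset.mem_filter, Finset.mem_Ico]
    rintro (h | ⟨⟨ha, hb⟩, -⟩)
    · omega
    · omega

-- pairing d ↦ N/d: as many divisors above sqrt N as strictly below it
lemma pvPairing (N : ℕ) (h1 : 1 ≤ N) :
    (N.divisors.filter fun d => N < d * d).card
      = (N.divisors.filter fun d => d * d < N).card := by
  apply Finset.card_bij' (i := fun d _ => N / d) (j := fun d _ => N / d)
  case hi =>
    intro d hd
    simp only [Finset.mem_filter, Nat.mem_divisors] at hd ⊢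
    obtain ⟨⟨⟨m, rfl⟩, hN0⟩, hlt⟩ := hd
    have hd0 : 0 < d := Nat.pos_of_ne_zero (fun h => by subst h; simp at hN0)
    have hm0 : 0 < m := Nat.pos_of_ne_zero (fun h => by subst h; simp at hN0)
    rw [Nat.mul_div_cancel_left m hd0]
    have hmd : m < d := Nat.lt_of_mul_lt_mul_left hlt
    exact ⟨⟨⟨d, mul_comm d m⟩, hN0⟩, mul_lt_mul_of_pos_right hmd hm0⟩
  case hj =>
    intro d hd
    simp only [Finset.mem_filter, Nat.mem_divisors] at hd ⊢
    obtain ⟨⟨⟨m, rfl⟩, hN0⟩, hlt⟩ := hd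
    have hd0 : 0 < d := Nat.pos_of_ne_zero (fun h => by subst h; simp at hN0)
    have hm0 : 0 < m := Nat.pos_of_ne_zero (fun h => by subst h; simp at hN0)
    rw [Nat.mul_div_cancel_left m hd0]
    have hdm : d < m := Nat.lt_of_mul_lt_mul_left hlt
    exact ⟨⟨⟨d, mul_comm d m⟩, hN0⟩, mul_lt_mul_of_pos_right hdm hm0⟩
  case left_inv =>
    intro d hd
    simp only [Finset.mem_filter, Nat.mem_divisors] at hd
    exact Nat.div_div_self hd.1.1 hd.1.2
  case right_inv =>
    intro d hd
    simp only [Finset.mem_filter, Nat.mem_divisors] at hd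
    exact Nat.div_div_self hd.1.1 hd.1.2

-- total divisor count from the below-sqrt half counts
lemma pvCardDivisors (N : ℕ) (h1 : 1 ≤ N) :
    N.divisors.card
      = (N.divisors.filter fun d => d * d = N).card
        + 2 * (N.divisors.filter fun d => d * d < N).card := by
  have hs1 : (N.divisors.filter fun d => d * d ≤ N).card
      + (N.divisors.filter fun d => ¬ d * d ≤ N).card = N.divisors.card :=
    Finset.card_filter_add_card_filter_not _
  have he1 : (N.divisors.filter fun d => ¬ d * d ≤ N)
      = N.divisors.filter fun d => N < d * d := by
    apply Finset.filter_congr; intro d _; simp [not_le]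
  have hs2 : ((N.divisors.filter fun d => d * d ≤ N).filter fun d => d * d < N).card
      + ((N.divisors.filter fun d => d * d ≤ N).filter fun d => ¬ d * d < N).card
      = (N.divisors.filter fun d => d * d ≤ N).card :=
    Finset.card_filter_add_card_filter_not _
  have he2 : ((N.divisors.filter fun d => d * d ≤ N).filter fun d => d * d < N)
      = N.divisors.filter fun d => d * d < N := by
    rw [Finset.filter_filter]
    apply Finset.filter_congr; intro d _; constructor
    · intro h; exact h.2
    · intro h; exact ⟨le_of_lt h, h⟩
  have he3 : ((N.divisors.filter fun d => d * d ≤ N).filter fun d => ¬ d * d < N)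
      = N.divisors.filter fun d => d * d = N := by
    rw [Finset.filter_filter]
    apply Finset.filter_congr; intro d _; constructor
    · intro h; omega
    · intro h; omega
  rw [he1] at hs1
  rw [he2, he3] at hs2
  rw [pvPairing N h1] at hs1
  omega

-- B's loop sums the contributions of the remaining candidates
lemma pvBLoop (N : ℕ) (fuel j : ℕ) (c : Int) (hj : 1 ≤ j)
    (hfuel : N.sqrt + 2 ≤ fuel + j) :
    divisoriLoopB (N : Int) fuel (j : Int) c
      = c + (∑ x ∈ Finset.Ico j (N.sqrt + 1), pvContrib N x : ℕ) := by
  induction fuel generalizing j c with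
  | zero =>
    have : N.sqrt + 1 ≤ j := by omega
    simp [divisoriLoopB, Finset.Ico_eq_empty_of_le this]
  | succ fuel ih =>
    rw [divisoriLoopB]
    by_cases hle : (j : Int) * (j : Int) ≤ (N : Int)
    · have hjs : j ≤ N.sqrt := Nat.le_sqrt.mpr (by exact_mod_cast hle)
      rw [if_pos hle]
      have hcast : (j : Int) + 1 = ((j + 1 : ℕ) : Int) := by push_cast; ring
      have hf2 : N.sqrt + 2 ≤ fuel + (j + 1) := by omega
      rw [hcast, ih (j + 1) _ (by omega) hf2]
      have hsum : ∑ x ∈ Finset.Ico j (N.sqrt + 1), pvContrib N x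
          = pvContrib N j + ∑ x ∈ Finset.Ico (j + 1) (N.sqrt + 1), pvContrib N x :=
        Finset.sum_eq_sum_Ico_succ_bot (by omega) _
      rw [hsum]
      by_cases hd : j ∣ N
      · by_cases he : j * j = N
        · have he' : ((j : Int)) * j = (N : Int) := by exact_mod_cast he
          simp [Int.natCast_dvd_natCast, hd, he, he', pvContrib]
          ring
        · have he' : ¬(((j : Int)) * j = (N : Int)) := by exact_mod_cast he
          simp [Int.natCast_dvd_natCast, hd, he, he', pvContrib]
          ring
      · simp [Int.natCast_dvd_natCast, hd, pvContrib]
    · rw [if_neg hle]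
      have hjs : N.sqrt < j := by
        have hNj : N < j * j := by exact_mod_cast not_le.mp hle
        exact Nat.sqrt_lt.mpr hNj
      rw [Finset.Ico_eq_empty_of_le (by omega)]
      simp

-- the contribution sum over the candidates 1..sqrt N is the divisor count
lemma pvBSum (N : ℕ) (h1 : 1 ≤ N) :
    (∑ x ∈ Finset.Ico 1 (N.sqrt + 1), pvContrib N x) = N.divisors.card := by
  unfold pvContrib
  rw [Finset.sum_ite, Finset.sum_const]
  simp only [smul_zero, add_zero]
  have hfil : (Finset.Ico 1 (N.sqrt + 1)).filter (fun x => x ∣ N)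
      = N.divisors.filter fun d => d * d ≤ N := by
    ext x
    simp only [Finset.mem_filter, Finset.mem_Ico, Nat.mem_divisors]
    constructor
    · rintro ⟨⟨hx1, hx2⟩, hd⟩
      exact ⟨⟨hd, by omega⟩, Nat.le_sqrt.mp (by omega)⟩
    · rintro ⟨⟨hd, hN0⟩, hsq⟩
      have := Nat.le_sqrt.mpr hsq
      exact ⟨⟨Nat.pos_of_dvd_of_pos hd (by omega), by omega⟩, hd⟩
  rw [hfil, Finset.sum_ite, Finset.sum_const, Finset.sum_const]
  have he2 : ((N.divisors.filter fun d => d * d ≤ N).filter fun x => x * x = N)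
      = N.divisors.filter fun d => d * d = N := by
    rw [Finset.filter_filter]
    apply Finset.filter_congr; intro d _; constructor
    · intro h; exact h.2
    · intro h; exact ⟨le_of_eq h, h⟩
  have he3 : ((N.divisors.filter fun d => d * d ≤ N).filter fun x => ¬ x * x = N)
      = N.divisors.filter fun d => d * d < N := by
    rw [Finset.filter_filter]
    apply Finset.filter_congr; intro d _; constructor
    · intro h; omega
    · intro h; omega
  rw [he2, he3, pvCardDivisors N h1]
  simp only [smul_eq_mul]
  ring

-- ===== VERDICT (by name: the statement is the Claim_ definition above) =====
theorem divisori_spec : Claim_equal_divisori := by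
  intro n k _
  show divisori n k = divisori_alt n k
  unfold divisori divisori_alt
  by_cases hn : n < 2
  · rw [PySem.List.pyRange_one_eq_nil (by omega)]
    simp only [List.foldl_nil, if_pos hn]
    by_cases hk : k = 0
    · subst hk; rfl
    · have h0 : ((0 : Int) == k) = false := by simp [Ne.symm hk]
      have h1 : (k == (0 : Int)) = false := by simp [hk]
      simp [h0, h1]
  · obtain ⟨N, rfl⟩ : ∃ N : ℕ, n = (N : Int) := ⟨n.toNat, by omega⟩
    have h2 : 2 ≤ N := by omega
    rw [if_neg hn, pvFoldlCount, pvACount N]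
    have hb := pvBLoop N (N + 1) 1 0 le_rfl (by have := Nat.sqrt_le_self N; omega)
    rw [pvBSum N (by omega)] at hb
    simp only [Nat.cast_one, zero_add] at hb
    rw [show ((N : Int).toNat + 1) = N + 1 by omega, hb, pvDivSplit N h2]
    simp only [pvIfTF, zero_add]
    generalize ((Finset.Ico 2 N).filter (· ∣ N)).card = c
    rw [show ((c + 2 : ℕ) : Int) - 2 = (c : Int) by push_cast; ring]
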